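-- pv_equiv track=rewrite | github.com/CDL-Quantum/CohortProject_2020 | Project_2_VQE_Molecules/utility.py | generate_representative
-- ===== SOURCE A (Python) =====
-- def generate_representative(flip_indices,n_qubits):
--
--     #generates parent with 1 y operation
--
--     term = ['e']*n_qubits
--
--     count = 0
--
--     for i in range(0,n_qubits):
--
--         if flip_indices[i] == 1:
--
--             if count == 0:
--                 term[i] = 'y'
--                 count = 1
--
--             else:
--                 term[i] = 'x'
--
--     return term
-- ===== SOURCE B (Python) =====
-- def generate_representative(flip_indices, n_qubits):
--     # locate the first flip index (or -1 if none), then build the term in one map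
--     first = next((i for i in range(n_qubits) if flip_indices[i] == 1), -1)
--     return ['y' if i == first else 'x' if flip_indices[i] == 1 else 'e'
--             for i in range(n_qubits)]
-- ===== Notes on version B (the rewrite author's own statement) =====
-- stated objective: simpler
-- what changed: Replaces A's stateful flag-carrying loop that mutates a preallocated list with a locate-first-then-map decomposition: first compute the index of the first flip, then build the whole term in a single comprehension.
import Mathlib
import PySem

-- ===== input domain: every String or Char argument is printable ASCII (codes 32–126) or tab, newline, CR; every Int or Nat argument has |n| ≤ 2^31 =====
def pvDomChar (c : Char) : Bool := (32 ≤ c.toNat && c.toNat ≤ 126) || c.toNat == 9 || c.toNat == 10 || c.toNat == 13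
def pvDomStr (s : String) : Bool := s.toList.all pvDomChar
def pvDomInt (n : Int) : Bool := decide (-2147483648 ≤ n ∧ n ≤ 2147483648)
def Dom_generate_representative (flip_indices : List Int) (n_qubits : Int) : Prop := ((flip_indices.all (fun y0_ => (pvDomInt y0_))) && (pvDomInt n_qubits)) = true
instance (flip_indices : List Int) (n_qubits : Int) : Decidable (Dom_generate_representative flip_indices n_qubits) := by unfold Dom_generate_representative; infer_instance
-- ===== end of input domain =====

-- B replaces A's stateful flag-carrying mutation loop by locate-first-then-map (objective: simpler).

-- ===== PORT A =====
-- the for-loop over range(0, n_qubits) carrying (term, count); flip_indices[i] is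
-- PySem.List.pyGetD (exact under Pre_, which puts every visited index in range)
def grLoopA (flip : List Int) : List Int → List String × Int → List String × Int
  | [], st => st
  | i :: rest, (term, count) =>
    if PySem.List.pyGetD flip i 0 = 1 then
      if count = 0 then grLoopA flip rest (term.set i.toNat "y", 1)
      else grLoopA flip rest (term.set i.toNat "x", count)
    else grLoopA flip rest (term, count)

def generate_representative (flip_indices : List Int) (n_qubits : Int) : List String :=
  (grLoopA flip_indices (PySem.List.pyRange 0 n_qubits 1)
    (List.replicate n_qubits.toNat "e", 0)).1

-- ===== PORT B =====
-- next((i for i in range(n_qubits) if flip_indices[i] == 1), -1)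
def firstFlip (flip : List Int) : List Int → Int
  | [] => -1
  | i :: rest => if PySem.List.pyGetD flip i 0 = 1 then i else firstFlip flip rest

def generate_representative_alt (flip_indices : List Int) (n_qubits : Int) : List String :=
  let idxs := PySem.List.pyRange 0 n_qubits 1
  let first := firstFlip flip_indices idxs
  idxs.map (fun i =>
    if i = first then "y"
    else if PySem.List.pyGetD flip_indices i 0 = 1 then "x" else "e")

-- ===== PRECONDITION & SPEC =====
-- Python A raises IndexError when n_qubits exceeds len(flip_indices); exactly those inputs are excluded.
def Pre_generate_representative (flip_indices : List Int) (n_qubits : Int) : Prop :=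
  n_qubits ≤ (flip_indices.length : Int)
instance (flip_indices : List Int) (n_qubits : Int) : Decidable (Pre_generate_representative flip_indices n_qubits) := by unfold Pre_generate_representative; infer_instance

def pvWitness_generate_representative : List Int × Int := ([0, 1, 0, 1], 4)

def Spec_generate_representative (flip_indices : List Int) (n_qubits : Int) (out : List String) : Prop := out = generate_representative_alt flip_indices n_qubits
instance (flip_indices : List Int) (n_qubits : Int) (out : List String) : Decidable (Spec_generate_representative flip_indices n_qubits out) := by unfold Spec_generate_representative; infer_instance

-- ===== CLAIM (what is proved, stated in full; the proofs are below) =====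
def Claim_equal_generate_representative : Prop := ∀ (flip_indices : List Int) (n_qubits : Int), Dom_generate_representative flip_indices n_qubits → Pre_generate_representative flip_indices n_qubits → Spec_generate_representative flip_indices n_qubits (generate_representative flip_indices n_qubits)

-- ===== LEMMAS AND PROOFS =====

-- once count = 1, the loop just sets 'x' at every flip position
theorem grLoopA_one (flip : List Int) :
    ∀ (L : List Int) (term : List String),
      grLoopA flip L (term, 1) =
        (L.foldl (fun t i => if PySem.List.pyGetD flip i 0 = 1 then t.set i.toNat "x" else t) term, 1) := by
  intro L
  induction L with
  | nil => intro term; simp [grLoopA]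
  | cons i rest ih =>
      intro term
      by_cases h : PySem.List.pyGetD flip i 0 = 1 <;> simp [grLoopA, h, ih]

theorem firstFlip_cases (flip : List Int) :
    ∀ (L : List Int), firstFlip flip L = -1 ∨ firstFlip flip L ∈ L := by
  intro L
  induction L with
  | nil => simp [firstFlip]
  | cons i rest ih =>
      by_cases h : PySem.List.pyGetD flip i 0 = 1
      · simp [firstFlip, h]
      · simp only [firstFlip, if_neg h]
        rcases ih with h1 | h1
        · exact Or.inl h1
        · exact Or.inr (List.mem_cons_of_mem _ h1)

-- characterisation of A's loop from count = 0: each visited index i is set to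
-- 'y' if it is the first flip, to 'x' if it is a later flip, untouched otherwise
theorem grLoopA_zero (flip : List Int) :
    ∀ (L : List Int) (term : List String), L.Nodup → (∀ i ∈ L, 0 ≤ i) →
      (grLoopA flip L (term, 0)).1 =
        L.foldl (fun t i =>
          if i = firstFlip flip L ∨ PySem.List.pyGetD flip i 0 = 1 then
            t.set i.toNat (if i = firstFlip flip L then "y" else "x") else t) term := by
  intro L
  induction L with
  | nil => intro term _ _; simp [grLoopA]
  | cons i rest ih =>
      intro term hnd hpos
      have hirest : i ∉ rest := (List.nodup_cons.mp hnd).1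
      by_cases h : PySem.List.pyGetD flip i 0 = 1
      · -- first flip found at i
        have hf : firstFlip flip (i :: rest) = i := by simp [firstFlip, h]
        rw [hf]
        simp only [grLoopA, if_pos h, grLoopA_one, List.foldl_cons]
        apply PySem.List.foldl_congr_mem
        intro t j hj
        have hne : j ≠ i := fun hc => hirest (hc ▸ hj)
        simp [hne]
      · have hf : firstFlip flip (i :: rest) = firstFlip flip rest := by
          simp [firstFlip, h]
        rw [hf]
        have hstep : ¬ (i = firstFlip flip rest ∨ PySem.List.pyGetD flip i 0 = 1) := by
          rintro (hc | hc)
          · rcases firstFlip_cases flip rest with h1 | h1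
            · have : (0:Int) ≤ i := hpos i (List.mem_cons_self ..)
              omega
            · exact hirest (hc ▸ h1)
          · exact h hc
        simp only [grLoopA, if_neg h, List.foldl_cons, if_neg hstep]
        exact ih term (List.nodup_cons.mp hnd).2 (fun j hj => hpos j (List.mem_cons_of_mem _ hj))

-- a fold of conditional sets keeps the length
theorem foldl_set_length (C : Int → Prop) [DecidablePred C] (v : Int → String) :
    ∀ (L : List Int) (term : List String),
      (L.foldl (fun t i => if C i then t.set i.toNat (v i) else t) term).length = term.length := by
  intro L
  induction L with
  | nil => intro term; rfl
  | cons i rest ih =>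
      intro term
      by_cases h : C i <;> simp [h, ih]

-- pointwise value of such a fold (indices nonnegative; the written value depends only on the index)
theorem foldl_set_getElem? (C : Int → Prop) [DecidablePred C] (v : Int → String) :
    ∀ (L : List Int) (term : List String) (j : Nat), (∀ i ∈ L, 0 ≤ i) → j < term.length →
      (L.foldl (fun t i => if C i then t.set i.toNat (v i) else t) term)[j]? =
        if (↑j ∈ L ∧ C ↑j) then some (v ↑j) else term[j]? := by
  intro L
  induction L with
  | nil => intro term j _ _; simp
  | cons i rest ih =>
      intro term j hpos hj
      have hrest : ∀ a ∈ rest, (0:Int) ≤ a := fun a ha => hpos a (List.mem_cons_of_mem _ ha)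
      simp only [List.foldl_cons]
      by_cases h : C i
      · rw [if_pos h]
        by_cases hij : i = (j : Int)
        · subst hij
          rw [Int.toNat_natCast] at *
          rw [ih _ j hrest (by simp [hj])]
          by_cases hm : (↑j : Int) ∈ rest ∧ C ↑j
          · rw [if_pos hm, if_pos ⟨List.mem_cons_self .., h⟩]
          · rw [if_neg hm, List.getElem?_set_self hj, if_pos ⟨List.mem_cons_self .., h⟩]
        · have htn : i.toNat ≠ j := by have := hpos i (List.mem_cons_self ..); omega
          rw [ih _ j hrest (by simp [hj]), List.getElem?_set_ne htn]
          have hmem : ((↑j : Int) ∈ i :: rest ∧ C ↑j) ↔ ((↑j : Int) ∈ rest ∧ C ↑j) := by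
            constructor
            · rintro ⟨hm, hc⟩
              rcases List.mem_cons.mp hm with hc' | hc'
              · exact absurd hc'.symm hij
              · exact ⟨hc', hc⟩
            · rintro ⟨hm, hc⟩; exact ⟨List.mem_cons_of_mem _ hm, hc⟩
          rw [if_congr hmem rfl rfl]
      · rw [if_neg h, ih _ j hrest hj]
        have hmem : ((↑j : Int) ∈ i :: rest ∧ C ↑j) ↔ ((↑j : Int) ∈ rest ∧ C ↑j) := by
          constructor
          · rintro ⟨hm, hc⟩
            rcases List.mem_cons.mp hm with hc' | hc'
            · exact absurd (hc' ▸ hc) h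
            · exact ⟨hc', hc⟩
          · rintro ⟨hm, hc⟩; exact ⟨List.mem_cons_of_mem _ hm, hc⟩
        rw [if_congr hmem rfl rfl]

-- ===== VERDICT (by name: the statement is the Claim_ definition above) =====
theorem generate_representative_spec : Claim_equal_generate_representative := by
  intro flip n _hdom _hpre
  unfold Spec_generate_representative generate_representative generate_representative_alt
  set L := PySem.List.pyRange 0 n 1 with hL
  have hpos : ∀ i ∈ L, (0:Int) ≤ i := by
    intro i hi
    exact (PySem.List.mem_pyRange_one.mp (hL ▸ hi)).1
  rw [grLoopA_zero flip L _ (hL ▸ PySem.List.nodup_pyRange_one 0 n) hpos]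
  apply List.ext_getElem?
  intro j
  have hlenL : L.length = n.toNat := by
    rw [hL, PySem.List.length_pyRange_one]; omega
  by_cases hj : j < n.toNat
  · rw [foldl_set_getElem? (fun i => i = firstFlip flip L ∨ PySem.List.pyGetD flip i 0 = 1)
        (fun i => if i = firstFlip flip L then "y" else "x") L _ j hpos
        (by rw [List.length_replicate]; omega)]
    have hjL : (↑j : Int) ∈ L := by
      rw [hL, PySem.List.mem_pyRange_one]; omega
    have hrep : (List.replicate n.toNat "e")[j]? = some "e" :=
      List.getElem?_replicate_of_lt hj
    have hmap : (L.map (fun i =>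
        if i = firstFlip flip L then "y"
        else if PySem.List.pyGetD flip i 0 = 1 then "x" else "e"))[j]? =
        some (if (↑j : Int) = firstFlip flip L then "y"
          else if PySem.List.pyGetD flip (↑j) 0 = 1 then "x" else "e") := by
      rw [List.getElem?_map]
      have : L[j]? = some (↑j : Int) := by
        rw [hL, PySem.List.getElem?_pyRange_one]
        simp only [zero_add]
        rw [if_pos (by omega)]
      rw [this]; rfl
    rw [hmap]
    by_cases hy : (↑j : Int) = firstFlip flip L
    · rw [if_pos ⟨hjL, Or.inl hy⟩, if_pos hy, if_pos hy]
    · by_cases hx : PySem.List.pyGetD flip (↑j) 0 = 1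
      · rw [if_pos ⟨hjL, Or.inr hx⟩, if_neg hy, if_neg hy, if_pos hx]
      · rw [if_neg (by rintro ⟨_, hc | hc⟩; exacts [hy hc, hx hc]), hrep,
          if_neg hy, if_neg hx]
  · trans (none : Option String)
    · apply List.getElem?_eq_none
      rw [foldl_set_length (fun i => i = firstFlip flip L ∨ PySem.List.pyGetD flip i 0 = 1)
        (fun i => if i = firstFlip flip L then "y" else "x"), List.length_replicate]
      omega
    · symm
      apply List.getElem?_eq_none
      rw [List.length_map, hlenL]
      omega
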